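-- pv_equiv track=rewrite | github.com/Aryan1718/developer-agent-skills | skills/dockerfile-optimizer/scripts/generate_report.py | determine_runtime_command
-- ===== SOURCE A (Python) =====
-- def determine_runtime_command(lines: list[str]) -> tuple[str | None, str | None]:
--     entrypoint = None
--     cmd = None
--     for raw_line in lines:
--         stripped = raw_line.strip()
--         if stripped.upper().startswith("ENTRYPOINT "):
--             entrypoint = stripped.split(None, 1)[1]
--         elif stripped.upper().startswith("CMD "):
--             cmd = stripped.split(None, 1)[1]
--     return entrypoint, cmd
-- ===== SOURCE B (Python) =====
-- def _directive(stripped):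
--     """Classify one stripped line: (slot, value) with slot 0 for ENTRYPOINT,
--     1 for CMD; None for any other line."""
--     upper = stripped.upper()
--     if upper.startswith("ENTRYPOINT "):
--         return 0, stripped.split(None, 1)[1]
--     if upper.startswith("CMD "):
--         return 1, stripped.split(None, 1)[1]
--     return None
--
-- def determine_runtime_command(lines: list[str]) -> tuple[str | None, str | None]:
--     # Single reverse pass: keep the first ENTRYPOINT / CMD seen from the end
--     # (i.e. the last one in the file) and stop as soon as both are found.
--     found = [None, None]
--     for raw_line in reversed(lines):
--         d = _directive(raw_line.strip())
--         if d is not None and found[d[0]] is None: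
--             found[d[0]] = d[1]
--             if found[0] is not None and found[1] is not None:
--                 break
--     return found[0], found[1]
-- ===== Notes on version B (the rewrite author's own statement) =====
-- stated objective: alternative
-- what changed: Scans the lines in reverse with a first-match-from-the-end rule and an early break once both directives are found, instead of A's full forward pass where the last match overwrites.
import Mathlib
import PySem

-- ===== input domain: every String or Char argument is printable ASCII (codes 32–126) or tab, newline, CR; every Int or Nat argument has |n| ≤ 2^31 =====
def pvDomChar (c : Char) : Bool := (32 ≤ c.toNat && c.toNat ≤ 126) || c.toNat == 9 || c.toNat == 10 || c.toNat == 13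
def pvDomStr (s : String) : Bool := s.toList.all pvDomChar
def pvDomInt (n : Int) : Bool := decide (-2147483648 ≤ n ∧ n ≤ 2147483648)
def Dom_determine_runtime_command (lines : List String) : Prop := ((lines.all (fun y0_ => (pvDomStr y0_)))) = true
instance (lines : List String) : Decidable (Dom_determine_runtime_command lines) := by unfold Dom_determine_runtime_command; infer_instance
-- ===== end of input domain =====

-- B replaces A's full forward pass (last match overwrites) by a reverse scan taking the
-- first ENTRYPOINT/CMD seen from the end, breaking as soon as both are found (objective: alternative).

-- ===== PORT A =====
-- stripped.split(None, 1)[1]: after startswith "ENTRYPOINT "/"CMD " the stripped line has a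
-- non-whitespace character after the space (strip removed trailing whitespace), so the index
-- always exists; .getD "" only totalizes, Python never raises here.
def pvRest (stripped : String) : String :=
  (PySem.List.pyGet? (PySem.Str.split₀Max stripped 1) 1).getD ""

def determine_runtime_command (lines : List String) : Option String × Option String :=
  lines.foldl (fun st raw_line =>
    let stripped := PySem.Str.strip raw_line
    if PySem.Str.startswith (PySem.Str.upper stripped) "ENTRYPOINT " then
      (some (pvRest stripped), st.2)
    else if PySem.Str.startswith (PySem.Str.upper stripped) "CMD " then
      (st.1, some (pvRest stripped))
    else st) (none, none)

-- ===== PORT B =====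
-- _directive: slot 0 is ported as Bool false, slot 1 as true
def pvDirective (stripped : String) : Option (Bool × String) :=
  let upper := PySem.Str.upper stripped
  if PySem.Str.startswith upper "ENTRYPOINT " then some (false, pvRest stripped)
  else if PySem.Str.startswith upper "CMD " then some (true, pvRest stripped)
  else none

def pvAltLoop : List String → Option String → Option String → Option String × Option String
  | [], e, c => (e, c)
  | raw_line :: rest, e, c =>
    let st :=
      match pvDirective (PySem.Str.strip raw_line) with
      | some (false, v) => if e.isNone then (some v, c) else (e, c)
      | some (true, v) => if c.isNone then (e, some v) else (e, c)
      | none => (e, c)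
    if st.1.isSome && st.2.isSome then st else pvAltLoop rest st.1 st.2

def determine_runtime_command_alt (lines : List String) : Option String × Option String :=
  pvAltLoop lines.reverse none none

-- ===== PRECONDITION & SPEC =====
def Spec_determine_runtime_command (lines : List String) (out : Option String × Option String) : Prop := out = determine_runtime_command_alt lines
instance (lines : List String) (out : Option String × Option String) : Decidable (Spec_determine_runtime_command lines out) := by unfold Spec_determine_runtime_command; infer_instance

-- ===== CLAIM (what is proved, stated in full; the proofs are below) =====
def Claim_equal_determine_runtime_command : Prop := ∀ (lines : List String), Dom_determine_runtime_command lines → Spec_determine_runtime_command lines (determine_runtime_command lines)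

-- ===== LEMMAS AND PROOFS =====

-- per-line contributions (the elif folded in: a line is ENTRYPOINT, or CMD, or neither)
def pvLineE (raw : String) : Option String :=
  let stripped := PySem.Str.strip raw
  if PySem.Str.startswith (PySem.Str.upper stripped) "ENTRYPOINT " then some (pvRest stripped) else none

def pvLineC (raw : String) : Option String :=
  let stripped := PySem.Str.strip raw
  if PySem.Str.startswith (PySem.Str.upper stripped) "ENTRYPOINT " then none
  else if PySem.Str.startswith (PySem.Str.upper stripped) "CMD " then some (pvRest stripped) else none

-- last-match-wins accumulation (A's direction)
def pvF : List String → Option String × Option String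
  | [] => (none, none)
  | x :: t => ((pvF t).1.or (pvLineE x), (pvF t).2.or (pvLineC x))

-- first-match-wins accumulation (B's direction)
def pvG : List String → Option String × Option String
  | [] => (none, none)
  | x :: t => ((pvLineE x).or (pvG t).1, (pvLineC x).or (pvG t).2)

theorem pvNotBoth (s : String) :
    ¬(PySem.Str.startswith s "ENTRYPOINT " = true ∧ PySem.Str.startswith s "CMD " = true) := by
  rintro ⟨h1, h2⟩
  simp only [PySem.Str.startswith_eq, PySem.Chars.startswith_iff] at h1 h2
  obtain ⟨t1, e1⟩ := h1
  obtain ⟨t2, e2⟩ := h2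
  rw [← e1] at e2
  have hC : "CMD ".toList = 'C' :: "MD ".toList := rfl
  have hE : "ENTRYPOINT ".toList = 'E' :: "NTRYPOINT ".toList := rfl
  rw [hC, hE] at e2
  simp at e2

theorem pvAfold (l : List String) (e c : Option String) :
    l.foldl (fun st raw_line =>
      let stripped := PySem.Str.strip raw_line
      if PySem.Str.startswith (PySem.Str.upper stripped) "ENTRYPOINT " then
        (some (pvRest stripped), st.2)
      else if PySem.Str.startswith (PySem.Str.upper stripped) "CMD " then
        (st.1, some (pvRest stripped))
      else st) (e, c) = ((pvF l).1.or e, (pvF l).2.or c) := by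
  induction l generalizing e c with
  | nil => simp [pvF]
  | cons x t ih =>
    simp only [List.foldl_cons]
    have hstep : (let stripped := PySem.Str.strip x
        if PySem.Str.startswith (PySem.Str.upper stripped) "ENTRYPOINT " then
          ((some (pvRest stripped) : Option String), c)
        else if PySem.Str.startswith (PySem.Str.upper stripped) "CMD " then
          (e, some (pvRest stripped))
        else (e, c)) = ((pvLineE x).or e, (pvLineC x).or c) := by
      simp only [pvLineE, pvLineC]
      split_ifs <;> simp only [Option.some_or, Option.none_or]
    rw [hstep, ih]
    simp only [pvF, Option.or_assoc]

theorem pvBloop (m : List String) (e c : Option String) :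
    pvAltLoop m e c = (e.or (pvG m).1, c.or (pvG m).2) := by
  induction m generalizing e c with
  | nil => simp [pvAltLoop, pvG]
  | cons x t ih =>
    rw [pvAltLoop]
    have hstep : (match pvDirective (PySem.Str.strip x) with
        | some (false, v) => if e.isNone then ((some v : Option String), c) else (e, c)
        | some (true, v) => if c.isNone then (e, some v) else (e, c)
        | none => (e, c)) = (e.or (pvLineE x), c.or (pvLineC x)) := by
      simp only [pvDirective, pvLineE, pvLineC]
      cases hE : PySem.Str.startswith (PySem.Str.upper (PySem.Str.strip x)) "ENTRYPOINT " <;>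
        cases hC : PySem.Str.startswith (PySem.Str.upper (PySem.Str.strip x)) "CMD "
      · cases e <;> cases c <;> simp
      · cases e <;> cases c <;> simp
      · cases e <;> cases c <;> simp
      · exact absurd ⟨hE, hC⟩ (pvNotBoth _)
    rw [hstep, ih]
    simp only [pvG, ← Option.or_assoc]
    by_cases h : ((e.or (pvLineE x)).isSome && (c.or (pvLineC x)).isSome) = true
    · rw [if_pos h]
      simp only [Bool.and_eq_true, Option.isSome_iff_exists] at h
      obtain ⟨⟨a, ha⟩, ⟨b, hb⟩⟩ := h
      rw [ha, hb, Option.some_or, Option.some_or]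
    · rw [if_neg h]

theorem pvG_append (a b : List String) :
    pvG (a ++ b) = ((pvG a).1.or (pvG b).1, (pvG a).2.or (pvG b).2) := by
  induction a with
  | nil => simp [pvG]
  | cons x t ih => simp only [List.cons_append, pvG, ih, Option.or_assoc]

theorem pvG_reverse (l : List String) : pvG l.reverse = pvF l := by
  induction l with
  | nil => rfl
  | cons x t ih =>
    simp only [List.reverse_cons, pvG_append, ih, pvF, pvG]
    simp only [Option.or_none]

-- ===== VERDICT (by name: the statement is the Claim_ definition above) =====
theorem determine_runtime_command_spec : Claim_equal_determine_runtime_command := by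
  intro lines _
  unfold Spec_determine_runtime_command determine_runtime_command determine_runtime_command_alt
  rw [pvAfold, pvBloop, pvG_reverse]
  simp
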